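-- pv_equiv track=rewrite | github.com/Alexgr8080/papercoverterieee | app.py | naive_md_to_latex
-- ===== SOURCE A (Python) =====
-- def naive_md_to_latex(text: str) -> str:
--     out = []
--     for line in text.splitlines():
--         if line.startswith("# "):
--             out.append(r"\section{" + line[2:] + "}")
--         elif line.startswith("## "):
--             out.append(r"\subsection{" + line[3:] + "}")
--         elif line.startswith("### "):
--             out.append(r"\subsubsection{" + line[4:] + "}")
--         else:
--             out.append(line)
--     return "\n".join(out)
-- ===== SOURCE B (Python) =====
-- def naive_md_to_latex(text: str) -> str:
--     cmds = ["section", "subsection", "subsubsection"]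
--     out = []
--     for line in text.splitlines():
--         n = 0
--         while n < len(line) and line[n] == '#':
--             n += 1
--         if 1 <= n <= 3 and n < len(line) and line[n] == ' ':
--             out.append('\\' + cmds[n - 1] + '{' + line[n + 1:] + '}')
--         else:
--             out.append(line)
--     return "\n".join(out)
-- ===== Notes on version B (the rewrite author's own statement) =====
-- stated objective: alternative
-- what changed: A tests each line against three fixed string prefixes ('# ', '## ', '### ') in an if/elif chain; B instead counts the leading '#' run with a while loop, checks for a following space, and looks the sectioning command up in a table indexed by the run length.
import Mathlib
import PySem

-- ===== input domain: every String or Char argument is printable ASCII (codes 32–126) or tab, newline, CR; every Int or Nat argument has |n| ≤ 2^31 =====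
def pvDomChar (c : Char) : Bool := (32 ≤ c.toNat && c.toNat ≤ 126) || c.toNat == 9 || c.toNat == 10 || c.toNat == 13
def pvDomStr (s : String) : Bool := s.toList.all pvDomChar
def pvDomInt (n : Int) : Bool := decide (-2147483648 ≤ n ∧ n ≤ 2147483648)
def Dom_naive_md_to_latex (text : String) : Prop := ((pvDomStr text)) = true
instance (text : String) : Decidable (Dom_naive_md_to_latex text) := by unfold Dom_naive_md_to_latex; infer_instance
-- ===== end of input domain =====

-- B replaces A's three fixed-prefix branches by counting the leading '#' run and a table
-- lookup of the sectioning command (objective: alternative decomposition, same cost).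

-- ===== PORT A =====
def naive_md_to_latex (text : String) : String :=
  let out := (PySem.Chars.splitlines text.toList).foldl (fun acc line =>
    if PySem.Chars.startswith line ['#', ' '] then
      acc ++ ["\\section{".toList ++ PySem.Chars.slice line (some 2) none ++ ['}']]
    else if PySem.Chars.startswith line ['#', '#', ' '] then
      acc ++ ["\\subsection{".toList ++ PySem.Chars.slice line (some 3) none ++ ['}']]
    else if PySem.Chars.startswith line ['#', '#', '#', ' '] then
      acc ++ ["\\subsubsection{".toList ++ PySem.Chars.slice line (some 4) none ++ ['}']]
    else acc ++ [line]) []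
  String.ofList (PySem.Chars.join ['\n'] out)

-- ===== PORT B =====
-- the while loop counting leading '#' characters
def pvCountHash : List Char → Nat
  | [] => 0
  | c :: rest => if c = '#' then pvCountHash rest + 1 else 0

def pvCmds : List (List Char) := ["section".toList, "subsection".toList, "subsubsection".toList]

def pvConvLine (line : List Char) : List Char :=
  let n := pvCountHash line
  if 1 ≤ n ∧ n ≤ 3 ∧ PySem.List.pyGet? line (n : Int) = some ' ' then
    '\\' :: pvCmds.getD (n - 1) [] ++ '{' :: PySem.Chars.slice line (some ((n : Int) + 1)) none ++ ['}']
  else line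

def naive_md_to_latex_alt (text : String) : String :=
  String.ofList (PySem.Chars.join ['\n'] ((PySem.Chars.splitlines text.toList).map pvConvLine))

-- ===== PRECONDITION & SPEC =====
def Spec_naive_md_to_latex (text : String) (out : String) : Prop := out = naive_md_to_latex_alt text
instance (text : String) (out : String) : Decidable (Spec_naive_md_to_latex text out) := by unfold Spec_naive_md_to_latex; infer_instance

-- ===== CLAIM (what is proved, stated in full; the proofs are below) =====
def Claim_equal_naive_md_to_latex : Prop := ∀ (text : String), Dom_naive_md_to_latex text → Spec_naive_md_to_latex text (naive_md_to_latex text)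

-- ===== LEMMAS AND PROOFS =====

-- per-line agreement of the two transformations
lemma countHash_hash (xs : List Char) : pvCountHash ('#' :: xs) = pvCountHash xs + 1 := by
  simp [pvCountHash]

lemma countHash_ne {c : Char} (h : c ≠ '#') (xs : List Char) : pvCountHash (c :: xs) = 0 := by
  simp [pvCountHash, h]

lemma convLine_eq (line : List Char) :
    (if PySem.Chars.startswith line ['#', ' '] then
      "\\section{".toList ++ PySem.Chars.slice line (some 2) none ++ ['}']
    else if PySem.Chars.startswith line ['#', '#', ' '] then
      "\\subsection{".toList ++ PySem.Chars.slice line (some 3) none ++ ['}']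
    else if PySem.Chars.startswith line ['#', '#', '#', ' '] then
      "\\subsubsection{".toList ++ PySem.Chars.slice line (some 4) none ++ ['}']
    else line) = pvConvLine line := by
  rcases line with _ | ⟨c1, l1⟩
  · simp [pvConvLine, pvCountHash, PySem.Chars.startswith_iff]
  by_cases h1 : c1 = '#'
  case neg =>
    simp [pvConvLine, countHash_ne h1, PySem.Chars.startswith_iff, List.cons_prefix_cons,
      Ne.symm h1]
  subst h1
  rcases l1 with _ | ⟨c2, l2⟩
  · simp [pvConvLine, pvCountHash, PySem.Chars.startswith_iff, List.cons_prefix_cons,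
      PySem.List.pyGet?]
    decide
  by_cases h2 : c2 = ' '
  · subst h2
    simp [pvConvLine, pvCmds, countHash_hash, countHash_ne (by decide : (' ':Char) ≠ '#'),
      PySem.Chars.startswith_iff, List.cons_prefix_cons, PySem.List.pyGet?, PySem.List.pyIdx?,
      PySem.List.slice]
  by_cases h2' : c2 = '#'
  case neg =>
    simp [pvConvLine, countHash_hash, countHash_ne h2', PySem.Chars.startswith_iff,
      List.cons_prefix_cons, Ne.symm h2, Ne.symm h2', h2, PySem.List.pyGet?, PySem.List.pyIdx?]
  subst h2'
  rcases l2 with _ | ⟨c3, l3⟩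
  · simp [pvConvLine, pvCountHash, PySem.Chars.startswith_iff, List.cons_prefix_cons,
      PySem.List.pyGet?, PySem.List.pyIdx?]
  by_cases h3 : c3 = ' '
  · subst h3
    have hlen : (2:Int) ≤ (l3.length : Int) + 1 + 1 := by omega
    simp [pvConvLine, pvCmds, countHash_hash, countHash_ne (by decide : (' ':Char) ≠ '#'),
      PySem.Chars.startswith_iff, List.cons_prefix_cons, PySem.List.pyGet?, PySem.List.pyIdx?,
      PySem.List.slice, hlen]
  by_cases h3' : c3 = '#'
  case neg =>
    have hlen : (2:Int) ≤ (l3.length : Int) + 1 + 1 := by omega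
    simp [pvConvLine, countHash_hash, countHash_ne h3', PySem.Chars.startswith_iff,
      List.cons_prefix_cons, Ne.symm h3, Ne.symm h3', h3, PySem.List.pyGet?, PySem.List.pyIdx?, hlen]
  subst h3'
  rcases l3 with _ | ⟨c4, l4⟩
  · simp [pvConvLine, pvCountHash, PySem.Chars.startswith_iff, List.cons_prefix_cons,
      PySem.List.pyGet?, PySem.List.pyIdx?]
  by_cases h4 : c4 = ' '
  · subst h4
    have hlen : (3:Int) ≤ (l4.length : Int) + 1 + 1 + 1 := by omega
    simp [pvConvLine, pvCmds, countHash_hash, countHash_ne (by decide : (' ':Char) ≠ '#'),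
      PySem.Chars.startswith_iff, List.cons_prefix_cons, PySem.List.pyGet?, PySem.List.pyIdx?,
      PySem.List.slice, hlen]
  by_cases h4' : c4 = '#'
  case neg =>
    have hlen : (3:Int) ≤ (l4.length : Int) + 1 + 1 + 1 := by omega
    simp [pvConvLine, countHash_hash, countHash_ne h4', PySem.Chars.startswith_iff,
      List.cons_prefix_cons, Ne.symm h4, h4, PySem.List.pyGet?, PySem.List.pyIdx?, hlen]
  subst h4'
  have hle : ¬ pvCountHash ('#' :: '#' :: '#' :: '#' :: l4) ≤ 3 := by
    simp only [countHash_hash]; omega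
  simp [pvConvLine, hle, PySem.Chars.startswith_iff, List.cons_prefix_cons]

lemma foldl_eq (lines : List (List Char)) (acc : List (List Char)) :
    lines.foldl (fun acc line =>
      if PySem.Chars.startswith line ['#', ' '] then
        acc ++ ["\\section{".toList ++ PySem.Chars.slice line (some 2) none ++ ['}']]
      else if PySem.Chars.startswith line ['#', '#', ' '] then
        acc ++ ["\\subsection{".toList ++ PySem.Chars.slice line (some 3) none ++ ['}']]
      else if PySem.Chars.startswith line ['#', '#', '#', ' '] then
        acc ++ ["\\subsubsection{".toList ++ PySem.Chars.slice line (some 4) none ++ ['}']]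
      else acc ++ [line]) acc = acc ++ lines.map pvConvLine := by
  induction lines generalizing acc with
  | nil => simp
  | cons l ls ih =>
    simp only [List.foldl_cons, List.map_cons]
    rw [← convLine_eq l]
    split_ifs <;> rw [ih] <;> simp

-- ===== VERDICT (by name: the statement is the Claim_ definition above) =====
theorem naive_md_to_latex_spec : Claim_equal_naive_md_to_latex := by
  intro text _
  unfold Spec_naive_md_to_latex naive_md_to_latex naive_md_to_latex_alt
  rw [foldl_eq]
  simp
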